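-- pv_equiv track=rewrite | github.com/dmp2/vestibular-meta-analysis | vestibular-meta-analysis/audit_workflow.py | assert_unique_keys
-- ===== SOURCE A (Python) =====
-- def clean(value: str | None) -> str:
--     if value is None:
--         return ""
--     text = str(value).strip()
--     if text.lower() in {"", "na", "nan"}:
--         return ""
--     return text
--
-- def merge_key(row: dict[str, str]) -> str:
--     return "||".join(
--         clean(row.get(column))
--         for column in ("Study_ID", "ROI_Homogenized", "Side", "Measure")
--     )
--
-- def assert_unique_keys(rows: list[dict[str, str]], source_name: str) -> dict[str, dict[str, str]]:
--     keyed: dict[str, dict[str, str]] = {}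
--     for row in rows:
--         key = merge_key(row)
--         if key in keyed:
--             raise ValueError(
--                 f"{source_name} has non-unique composite keys on "
--                 "Study_ID + ROI_Homogenized + Side + Measure"
--             )
--         keyed[key] = row
--     return keyed
-- ===== SOURCE B (Python) =====
-- def clean(value):
--     if value is None:
--         return ""
--     text = str(value).strip()
--     if text.lower() in {"", "na", "nan"}:
--         return ""
--     return text
--
-- def merge_key(row):
--     return "||".join(
--         clean(row.get(column))
--         for column in ("Study_ID", "ROI_Homogenized", "Side", "Measure")
--     )
--
-- def assert_unique_keys(rows, source_name):
--     keys = [merge_key(r) for r in rows]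
--     if len(set(keys)) != len(keys):
--         raise ValueError(
--             f"{source_name} has non-unique composite keys on "
--             "Study_ID + ROI_Homogenized + Side + Measure"
--         )
--     return dict(zip(keys, rows))
-- ===== Notes on version B (the rewrite author's own statement) =====
-- stated objective: simpler
-- what changed: Replaces the interleaved per-row membership-check-and-insert loop with three separate passes: collect all composite keys with a comprehension, detect duplicates globally by comparing len(set(keys)) with len(keys), and build the mapping with dict(zip(keys, rows)).
import Mathlib
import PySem

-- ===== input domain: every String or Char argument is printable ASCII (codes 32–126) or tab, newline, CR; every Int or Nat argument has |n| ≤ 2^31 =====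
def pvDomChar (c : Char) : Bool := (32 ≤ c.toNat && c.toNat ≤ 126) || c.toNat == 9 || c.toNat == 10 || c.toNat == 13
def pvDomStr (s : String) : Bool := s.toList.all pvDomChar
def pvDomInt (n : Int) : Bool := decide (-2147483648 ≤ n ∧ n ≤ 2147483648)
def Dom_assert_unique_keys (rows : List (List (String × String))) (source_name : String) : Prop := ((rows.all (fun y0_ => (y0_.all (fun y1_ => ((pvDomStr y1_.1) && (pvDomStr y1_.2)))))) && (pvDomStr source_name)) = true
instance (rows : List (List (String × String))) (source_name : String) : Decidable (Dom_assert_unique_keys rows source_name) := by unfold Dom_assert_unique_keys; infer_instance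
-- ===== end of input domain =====

-- B builds the mapping in three separate passes (collect keys, global duplicate check via set
-- cardinality, dict(zip(keys, rows))) instead of A's interleaved check-and-insert loop; equal on
-- all inputs where A returns (duplicate composite keys, where both raise ValueError, are outside Pre_).

-- shared module helpers (Python's clean / merge_key, used by both A and B)
def pvClean (value : Option String) : String :=
  match value with
  | none => ""
  | some v =>
    let text := PySem.Str.strip v
    if PySem.Str.lower text = "" ∨ PySem.Str.lower text = "na" ∨ PySem.Str.lower text = "nan"
    then "" else text

def pvMergeKey (row : List (String × String)) : String :=
  PySem.Str.join "||"
    ((["Study_ID", "ROI_Homogenized", "Side", "Measure"]).map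
      (fun column => pvClean (PySem.Dict.get? (PySem.Dict.mk row) column)))

-- ===== PORT A =====
-- A's loop: for each row, raise ValueError if the key is already present, else insert.
-- On the duplicate branch Python raises; Pre_ excludes those inputs (the port stops there).
def pvLoopA (keyed : PySem.Dict String (List (String × String))) :
    List (List (String × String)) → PySem.Dict String (List (String × String))
  | [] => keyed
  | row :: rest =>
    let key := pvMergeKey row
    if keyed.contains key then keyed   -- Python: raise ValueError (excluded by Pre_)
    else pvLoopA (keyed.insert key row) rest

def assert_unique_keys (rows : List (List (String × String))) (source_name : String) : List (String × List (String × String)) :=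
  (pvLoopA PySem.Dict.empty rows).items

-- ===== PORT B =====
def assert_unique_keys_alt (rows : List (List (String × String))) (source_name : String) : List (String × List (String × String)) :=
  let keys := rows.map pvMergeKey
  if PySem.Set.len (PySem.Set.ofList keys) ≠ keys.length then []   -- Python: raise ValueError (excluded by Pre_)
  else ((keys.zip rows).foldl (fun d p => d.insert p.1 p.2) PySem.Dict.empty).items

-- ===== PRECONDITION & SPEC =====
-- Pre_ excludes exactly the inputs whose composite keys repeat: there A (and B) raises ValueError.
def Pre_assert_unique_keys (rows : List (List (String × String))) (source_name : String) : Prop :=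
  (rows.map pvMergeKey).Nodup
instance (rows : List (List (String × String))) (source_name : String) : Decidable (Pre_assert_unique_keys rows source_name) := by unfold Pre_assert_unique_keys; infer_instance

def pvWitness_assert_unique_keys : (List (List (String × String))) × String :=
  ([[("Study_ID", "s1"), ("Side", "L")], [("Study_ID", "s2"), ("Measure", " NA ")]], "src")

def Spec_assert_unique_keys (rows : List (List (String × String))) (source_name : String) (out : List (String × List (String × String))) : Prop := out = assert_unique_keys_alt rows source_name
instance (rows : List (List (String × String))) (source_name : String) (out : List (String × List (String × String))) : Decidable (Spec_assert_unique_keys rows source_name out) := by unfold Spec_assert_unique_keys; infer_instance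

-- ===== CLAIM (what is proved, stated in full; the proofs are below) =====
def Claim_equal_assert_unique_keys : Prop := ∀ (rows : List (List (String × String))) (source_name : String), Dom_assert_unique_keys rows source_name → Pre_assert_unique_keys rows source_name → Spec_assert_unique_keys rows source_name (assert_unique_keys rows source_name)

-- ===== LEMMAS AND PROOFS =====

-- A's loop over rows with pairwise-distinct, fresh keys appends (key, row) pairs in order.
theorem pvLoopA_items (rows : List (List (String × String)))
    (d : PySem.Dict String (List (String × String)))
    (hnd : (rows.map pvMergeKey).Nodup)
    (hdk : d.keys.Nodup)
    (hfresh : ∀ r ∈ rows, d.contains (pvMergeKey r) = false) :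
    (pvLoopA d rows).items = d.items ++ rows.map (fun r => (pvMergeKey r, r)) := by
  induction rows generalizing d with
  | nil => simp [pvLoopA]
  | cons row rest ih =>
    simp only [List.map_cons, List.nodup_cons] at hnd
    have hf := hfresh row (by simp)
    rw [pvLoopA, if_neg (by simp [hf])]
    rw [ih (d.insert (pvMergeKey row) row) hnd.2
        (PySem.Dict.nodup_keys_insert d _ _ hdk)
        (by
          intro r hr
          rw [PySem.Dict.contains_insert]
          have hne : pvMergeKey r ≠ pvMergeKey row := by
            intro h; exact hnd.1 (h ▸ List.mem_map_of_mem hr)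
          simp [hne, hfresh r (List.mem_cons_of_mem _ hr)])]
    rw [PySem.Dict.items_insert_of_not_contains d row hf]
    simp

-- zipping the key list with the rows pairs each row with its own key
theorem pv_zip_map_key (rows : List (List (String × String))) :
    (rows.map pvMergeKey).zip rows = rows.map (fun r => (pvMergeKey r, r)) := by
  induction rows with
  | nil => rfl
  | cons r rs ih => simp [ih]

theorem assert_unique_keys_spec_aux (rows : List (List (String × String))) (source_name : String)
    (hpre : (rows.map pvMergeKey).Nodup) :
    assert_unique_keys rows source_name = assert_unique_keys_alt rows source_name := by
  unfold assert_unique_keys assert_unique_keys_alt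
  dsimp only
  rw [PySem.Set.ofList_eq_self_of_nodup _ hpre,
      if_neg (by simp [PySem.Set.len]), pv_zip_map_key,
      PySem.Dict.items_foldl_insert_fresh _ Prod.fst Prod.snd PySem.Dict.empty
        (by intro a _; simp) (by simpa using hpre),
      pvLoopA_items rows PySem.Dict.empty hpre (by simp) (by intro r _; simp)]
  simp

-- ===== VERDICT (by name: the statement is the Claim_ definition above) =====
theorem assert_unique_keys_spec : Claim_equal_assert_unique_keys := by
  intro rows source_name _ hpre
  exact assert_unique_keys_spec_aux rows source_name hpre
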